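-- pv_equiv track=rewrite | github.com/joanvelja/tinker-cookbook | scripts/truncation_gradient_weight.py | group_episodes
-- ===== SOURCE A (Python) =====
-- def group_episodes(episodes: list[dict]) -> list[list[dict]]:
--     """Group consecutive episodes with the same problem text."""
--     groups = []
--     current = []
--     for ep in episodes:
--         if current and ep["problem"] != current[0]["problem"]:
--             groups.append(current)
--             current = []
--         current.append(ep)
--     if current:
--         groups.append(current)
--     return groups
-- ===== SOURCE B (Python) =====
-- def group_episodes(episodes: list[dict]) -> list[list[dict]]:
--     """Group consecutive episodes with the same problem text, built back-to-front:
--     walk the episodes in reverse, comparing each episode to its right neighbour,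
--     accumulating reversed groups in reverse order, then un-reverse at the end."""
--     rev = []  # groups in reverse order; each group's episodes in reverse order
--     for ep in reversed(episodes):
--         if rev and ep["problem"] == rev[-1][-1]["problem"]:
--             rev[-1].append(ep)
--         else:
--             rev.append([ep])
--     return [g[::-1] for g in reversed(rev)]
-- ===== Notes on version B (the rewrite author's own statement) =====
-- stated objective: alternative
-- what changed: B traverses the episodes in reverse, comparing each episode to its right neighbour and building the groups back-to-front in reversed buffers that are un-reversed at the end, instead of A's forward pass with a flush-on-key-change accumulator.
import Mathlib
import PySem

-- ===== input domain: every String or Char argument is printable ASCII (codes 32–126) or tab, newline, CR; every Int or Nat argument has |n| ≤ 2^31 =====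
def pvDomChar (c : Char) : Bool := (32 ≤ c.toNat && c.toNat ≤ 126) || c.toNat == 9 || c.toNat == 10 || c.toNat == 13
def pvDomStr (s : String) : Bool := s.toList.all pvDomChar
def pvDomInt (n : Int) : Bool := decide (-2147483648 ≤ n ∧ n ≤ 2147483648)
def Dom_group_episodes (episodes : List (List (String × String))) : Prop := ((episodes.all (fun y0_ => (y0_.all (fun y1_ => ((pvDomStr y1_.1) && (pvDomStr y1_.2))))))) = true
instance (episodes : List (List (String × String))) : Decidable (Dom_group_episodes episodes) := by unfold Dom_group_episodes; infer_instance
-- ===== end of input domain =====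

-- B builds the grouping back-to-front from a reverse traversal; A builds it front-to-back
-- with a flush-on-key-change buffer. Equal return value on all inputs where A returns
-- (A raises KeyError when some episode lacks the "problem" key and a comparison reaches it).

-- ep["problem"] as a total lookup (none = KeyError; Pre_ rules the none case out where Python evaluates it)
def pvKey (ep : List (String × String)) : Option String :=
  (PySem.Dict.mk ep).get? "problem"

-- ===== PORT A =====
-- loop body: flush `current` into `groups` on a key change, then append ep to `current`
def pvAStep (st : List (List (List (String × String))) × List (List (String × String)))
    (ep : List (String × String)) :
    List (List (List (String × String))) × List (List (String × String)) :=
  let st' := if st.2 ≠ [] ∧ pvKey ep ≠ pvKey (st.2.headD []) then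
      (st.1 ++ [st.2], ([] : List (List (String × String))))
    else st
  (st'.1, st'.2 ++ [ep])

-- trailing `if current: groups.append(current)`
def pvAFin (st : List (List (List (String × String))) × List (List (String × String))) :
    List (List (List (String × String))) :=
  if st.2 ≠ [] then st.1 ++ [st.2] else st.1

def group_episodes (episodes : List (List (String × String))) : List (List (List (String × String))) :=
  pvAFin (episodes.foldl pvAStep ([], []))

-- ===== PORT B =====
-- loop body over reversed episodes: rev holds the groups in reverse order, each group reversed;
-- append ep to the last group if it matches its right neighbour rev[-1][-1], else open a new group
def pvBStep (rev : List (List (List (String × String)))) (ep : List (String × String)) :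
    List (List (List (String × String))) :=
  if rev ≠ [] ∧ pvKey ep = pvKey ((rev.getLastD []).getLastD []) then
    rev.dropLast ++ [rev.getLastD [] ++ [ep]]
  else
    rev ++ [[ep]]

def group_episodes_alt (episodes : List (List (String × String))) : List (List (List (String × String))) :=
  ((episodes.reverse.foldl pvBStep []).reverse).map List.reverse

-- ===== PRECONDITION & SPEC =====
-- Pre_ excludes exactly the inputs where Python A raises KeyError: with ≥ 2 episodes every
-- episode's "problem" key is evaluated; with ≤ 1 episode no lookup ever happens.
def Pre_group_episodes (episodes : List (List (String × String))) : Prop :=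
  episodes.length ≤ 1 ∨ ∀ ep ∈ episodes, ((PySem.Dict.mk ep).get? "problem").isSome = true

instance (episodes : List (List (String × String))) : Decidable (Pre_group_episodes episodes) := by
  unfold Pre_group_episodes; infer_instance

def pvWitness_group_episodes : (List (List (String × String))) :=
  [[("problem", "a")], [("problem", "a"), ("x", "1")], [("problem", "b")]]

def Spec_group_episodes (episodes : List (List (String × String))) (out : List (List (List (String × String)))) : Prop := out = group_episodes_alt episodes
instance (episodes : List (List (String × String))) (out : List (List (List (String × String)))) : Decidable (Spec_group_episodes episodes out) := by unfold Spec_group_episodes; infer_instance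

-- ===== CLAIM (what is proved, stated in full; the proofs are below) =====
def Claim_equal_group_episodes : Prop := ∀ (episodes : List (List (String × String))), Dom_group_episodes episodes → Pre_group_episodes episodes → Spec_group_episodes episodes (group_episodes episodes)

-- ===== LEMMAS AND PROOFS =====

-- reference grouping function (foldr, cons-into-first-group); both ports are reduced to it
def pvF (ep : List (String × String)) (acc : List (List (List (String × String)))) :
    List (List (List (String × String))) :=
  match acc with
  | [] => [[ep]]
  | g :: gs => if pvKey ep = pvKey (g.headD []) then (ep :: g) :: gs else [ep] :: g :: gs

-- first group of pvF's result starts with ep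
theorem pvF_head (ep : List (String × String)) (acc : List (List (List (String × String)))) :
    ((pvF ep acc).headD []).headD [] = ep := by
  cases acc with
  | nil => simp [pvF]
  | cons g gs => simp only [pvF]; split_ifs <;> simp

-- the head of a reversed list is its last element
theorem pvRevHeadD {α : Type} (g : List α) (d : α) : g.reverse.headD d = g.getLastD d := by
  rcases g.eq_nil_or_concat with h | ⟨g', a, h⟩ <;> subst h <;>
    simp [List.concat_eq_append]

-- B side: the reversed fold, un-reversed, is the foldr grouping
theorem pvB_eq_foldr (es : List (List (String × String))) :
    ((es.foldr (fun ep rev => pvBStep rev ep) []).reverse).map List.reverse = es.foldr pvF [] := by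
  induction es with
  | nil => simp
  | cons e es ih =>
    simp only [List.foldr_cons]
    rcases (es.foldr (fun ep rev => pvBStep rev ep) []).eq_nil_or_concat with h | ⟨r', g, h⟩
    · rw [h] at ih ⊢
      simp only [List.reverse_nil, List.map_nil] at ih
      rw [← ih]
      simp [pvBStep, pvF]
    · rw [List.concat_eq_append] at h
      rw [h] at ih ⊢
      simp only [List.reverse_append, List.reverse_cons, List.reverse_nil, List.nil_append,
        List.singleton_append, List.map_cons] at ih
      rw [← ih]
      have hne : r' ++ [g] ≠ [] := by simp
      simp only [pvBStep, pvF, hne, ne_eq, not_false_eq_true, true_and,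
        List.getLastD_concat, List.dropLast_concat, pvRevHeadD]
      split_ifs with h1
      · simp
      · simp only [List.reverse_append, List.reverse_cons, List.reverse_nil, List.nil_append,
          List.singleton_append, List.map_cons]

theorem pvB_alt (episodes : List (List (String × String))) :
    group_episodes_alt episodes = episodes.foldr pvF [] := by
  unfold group_episodes_alt
  rw [List.foldl_reverse, pvB_eq_foldr]

-- the two arms of A's loop body as equations
theorem pvAStep_pos (gs : List (List (List (String × String))))
    (cur : List (List (String × String))) (e : List (String × String))
    (h : cur ≠ [] ∧ pvKey e ≠ pvKey (cur.headD [])) :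
    pvAStep (gs, cur) e = (gs ++ [cur], [e]) := by
  simp only [pvAStep]
  rw [if_pos h]
  rfl

theorem pvAStep_neg (gs : List (List (List (String × String))))
    (cur : List (List (String × String))) (e : List (String × String))
    (h : ¬ (cur ≠ [] ∧ pvKey e ≠ pvKey (cur.headD []))) :
    pvAStep (gs, cur) e = (gs, cur ++ [e]) := by
  simp only [pvAStep]
  rw [if_neg h]

-- pvF never produces the empty grouping
theorem pvF_ne_nil (ep : List (String × String)) (acc : List (List (List (String × String)))) :
    pvF ep acc ≠ [] := by
  cases acc with
  | nil => simp [pvF]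
  | cons g gs => simp only [pvF]; split_ifs <;> simp

-- A side, step 1: the groups already flushed distribute out of the fold
theorem pvA_shift (es : List (List (String × String)))
    (gs : List (List (List (String × String)))) (cur : List (List (String × String))) :
    pvAFin (es.foldl pvAStep (gs, cur)) = gs ++ pvAFin (es.foldl pvAStep ([], cur)) := by
  induction es generalizing gs cur with
  | nil => by_cases h : cur = [] <;> simp [pvAFin, h]
  | cons e es ih =>
    by_cases h : cur ≠ [] ∧ pvKey e ≠ pvKey (cur.headD [])
    · rw [List.foldl_cons, List.foldl_cons, pvAStep_pos _ _ _ h, pvAStep_pos _ _ _ h,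
        ih (gs ++ [cur]) [e]]
      simp only [List.nil_append]
      rw [ih [cur] [e], List.append_assoc]
    · rw [List.foldl_cons, List.foldl_cons, pvAStep_neg _ _ _ h, pvAStep_neg _ _ _ h]
      exact ih gs (cur ++ [e])

-- helper for the merge step: cons the pending buffer onto the foldr grouping
def pvConsG (cur : List (List (String × String))) (acc : List (List (List (String × String)))) :
    List (List (List (String × String))) :=
  match acc with
  | [] => [cur]
  | g :: gs => if pvKey (cur.headD []) = pvKey (g.headD []) then (cur ++ g) :: gs else cur :: g :: gs

theorem pvF_eq_consG (e : List (String × String)) (acc : List (List (List (String × String)))) :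
    pvF e acc = pvConsG [e] acc := by
  cases acc with
  | nil => simp [pvF, pvConsG]
  | cons g gs => simp [pvF, pvConsG]

-- A side, step 2: finishing the fold with a nonempty pending buffer merges it into the foldr grouping
theorem pvA_run (es : List (List (String × String))) (cur : List (List (String × String)))
    (hcur : cur ≠ []) :
    pvAFin (es.foldl pvAStep ([], cur)) = pvConsG cur (es.foldr pvF []) := by
  induction es generalizing cur with
  | nil =>
    simp [pvAFin, hcur, pvConsG]
  | cons e es ih =>
    obtain ⟨c, cur', rfl⟩ := List.exists_cons_of_ne_nil hcur
    simp only [List.foldl_cons, List.foldr_cons]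
    by_cases h : pvKey e = pvKey ((c :: cur').headD [])
    · -- same key: e joins the pending buffer
      have hstep : pvAStep ([], c :: cur') e = ([], (c :: cur') ++ [e]) := by
        apply pvAStep_neg
        simp [h]
      rw [hstep, ih ((c :: cur') ++ [e]) (by simp)]
      simp only [List.headD_cons] at h
      rcases hacc : es.foldr pvF [] with _ | ⟨g, gs⟩
      · simp [pvF, pvConsG, h]
      · simp only [pvF, pvConsG, List.cons_append, List.headD_cons]
        split_ifs with h1 <;> simp_all
    · -- key change: the buffer is flushed, e starts a new one
      have hstep : pvAStep ([], c :: cur') e = ([c :: cur'], [e]) := by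
        apply pvAStep_pos
        exact ⟨by simp, h⟩
      rw [hstep, pvA_shift es [c :: cur'] [e], ih [e] (by simp)]
      rw [← pvF_eq_consG]
      simp only [List.headD_cons] at h
      rcases hacc : pvF e (es.foldr pvF []) with _ | ⟨g, gs⟩
      · exact absurd hacc (pvF_ne_nil e _)
      · have hg : g.headD [] = e := by
          have := pvF_head e (es.foldr pvF []); rw [hacc] at this; simpa using this
        have hkc : ¬ pvKey ((c :: cur').headD []) = pvKey (g.headD []) := by
          rw [hg, List.headD_cons]
          exact fun hh => h hh.symm
        simp only [pvConsG]
        rw [if_neg hkc]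
        rfl

-- ===== VERDICT (by name: the statement is the Claim_ definition above) =====
theorem group_episodes_spec : Claim_equal_group_episodes := by
  intro episodes _ _
  unfold Spec_group_episodes
  rw [pvB_alt]
  cases episodes with
  | nil => simp [group_episodes, pvAFin]
  | cons e es =>
    unfold group_episodes
    simp only [List.foldl_cons, List.foldr_cons]
    have hstep : pvAStep ([], []) e = ([], [e]) := by
      apply pvAStep_neg
      simp
    rw [hstep, pvA_run es [e] (by simp), ← pvF_eq_consG]
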